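-- pv_equiv track=rewrite | github.com/mozilla/ActiveData | mo_json/decoder.py | jump_string
-- ===== SOURCE A (Python) =====
-- def jump_string(i, json):
--     while True:
--         c = json[i]
--         i += 1
--         if c == "\"":
--             return i
--         elif c == "\\":
--             c = json[i]
--             if c == "u":
--                 i += 5
--             elif c in ["\"", "\\", "/", "b", "n", "f", "n", "t"]:
--                 i += 1
--             else:
--                 pass
-- ===== SOURCE B (Python) =====
-- def jump_string(i, json):
--     # Escape-hopping scan: find the next quote and the next backslash; return past the
--     # quote when it comes first, otherwise resolve one escape and continue.
--     while True:
--         q = json.find("\"", i)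
--         b = json.find("\\", i)
--         if q != -1 and (b == -1 or q < b):
--             return q + 1
--         if b == -1:
--             raise IndexError("unterminated string literal")
--         c = json[b + 1]
--         if c == "u":
--             i = b + 6
--         elif c in "\"\\/bnft":
--             i = b + 2
--         else:
--             i = b + 1
-- ===== Notes on version B (the rewrite author's own statement) =====
-- stated objective: faster
-- what changed: A advances one character per loop iteration; B hops with str.find to the next quote/backslash and resolves one escape per iteration, so it loops once per escape instead of once per character.
-- outside the precondition, e.g. on jump_string(-3, '"ab"'): A returns 0, B returns 4; on jump_string(-1, 'x"'): A returns 0, B returns 2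
import Mathlib
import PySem

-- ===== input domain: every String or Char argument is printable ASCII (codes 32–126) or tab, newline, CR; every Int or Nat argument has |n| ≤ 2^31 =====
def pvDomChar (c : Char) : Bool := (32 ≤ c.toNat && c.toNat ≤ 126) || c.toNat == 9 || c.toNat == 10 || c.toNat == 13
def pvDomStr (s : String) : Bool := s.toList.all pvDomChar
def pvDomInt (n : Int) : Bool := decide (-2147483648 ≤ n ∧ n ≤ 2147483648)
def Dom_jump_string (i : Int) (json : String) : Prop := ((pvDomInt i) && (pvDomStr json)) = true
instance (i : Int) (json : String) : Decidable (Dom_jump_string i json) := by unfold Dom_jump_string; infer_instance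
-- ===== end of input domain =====

-- B replaces A's one-character-per-iteration scan by an escape-hopping loop over str.find
-- (one iteration per escape); equivalence of the RETURN VALUE is proved on every input
-- where A returns and the start index is nonnegative.

-- ===== PORT A =====

-- literal transliteration of A's while-loop as index recursion; the fuel only bounds the
-- loop (inside Pre_ the quote is hit after at most length steps, so length+1 is never
-- exhausted); IndexError ↦ -1 (outside Pre_)
def pv_jumpA (cs : List Char) (fuel : Nat) (i : Int) : Int :=
  match fuel with
  | 0 => -1
  | fuel + 1 =>
    match PySem.List.pyGet? cs i with
    | none => -1
    | some c =>
      if c = '"' then i + 1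
      else if c = '\\' then
        match PySem.List.pyGet? cs (i + 1) with
        | none => -1
        | some c2 =>
          if c2 = 'u' then pv_jumpA cs fuel (i + 1 + 5)
          else if c2 ∈ ['"', '\\', '/', 'b', 'n', 'f', 'n', 't'] then pv_jumpA cs fuel (i + 1 + 1)
          else pv_jumpA cs fuel (i + 1)
      else pv_jumpA cs fuel (i + 1)

def jump_string (i : Int) (json : String) : Int :=
  pv_jumpA json.toList (json.toList.length + 1) i

-- ===== PORT B =====

-- literal transliteration of Source B's find-hopping while-loop; same fuel bound; both of
-- Source B's IndexErrors (the explicit raise and json[b+1] off the end) ↦ -1 (outside Pre_)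
def pv_jumpB (cs : List Char) (fuel : Nat) (i : Int) : Int :=
  match fuel with
  | 0 => -1
  | fuel + 1 =>
    let q := PySem.Chars.findFrom cs ['"'] i none
    let b := PySem.Chars.findFrom cs ['\\'] i none
    if q ≠ -1 ∧ (b = -1 ∨ q < b) then q + 1
    else if b = -1 then -1
    else
      match PySem.List.pyGet? cs (b + 1) with
      | none => -1
      | some c =>
        if c = 'u' then pv_jumpB cs fuel (b + 6)
        else if c ∈ ['"', '\\', '/', 'b', 'n', 'f', 'n', 't'] then pv_jumpB cs fuel (b + 2)
        else pv_jumpB cs fuel (b + 1)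

def jump_string_alt (i : Int) (json : String) : Int :=
  pv_jumpB json.toList (json.toList.length + 1) i

-- ===== PRECONDITION & SPEC =====

-- one step of A's scan, as a plain transition on positions: what the scan does at
-- position p (used only to STATE where the scan terminates; Pre_ below quantifies over
-- its iterates instead of re-running either port)
def pvStep (cs : List Char) (p : Nat) : Nat :=
  if cs[p]? = some '\\' then
    if cs[p + 1]? = some 'u' then p + 6
    else if cs[p + 1]?.any (fun c => decide (c ∈ ['"', '\\', '/', 'b', 'n', 'f', 'n', 't'])) then p + 2
    else p + 1
  else p + 1

-- Pre_ excludes (a) negative starts, where A's value comes from Python's negative-index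
-- wraparound (an artefact of A's indexing that B's find-based scan does not reproduce),
-- and (b) starts from which the scan never lands on a closing quote, where A (and Source B)
-- raise IndexError.  Inside Pre_ some iterate of the one-step transition is a quote.
def Pre_jump_string (i : Int) (json : String) : Prop :=
  0 ≤ i ∧ ∃ k ≤ json.toList.length, json.toList[(pvStep json.toList)^[k] i.toNat]? = some '"'
instance (i : Int) (json : String) : Decidable (Pre_jump_string i json) := by
  unfold Pre_jump_string; infer_instance

def pvWitness_jump_string : Int × String := (0, "a\\n\"")

def Spec_jump_string (i : Int) (json : String) (out : Int) : Prop := out = jump_string_alt i json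
instance (i : Int) (json : String) (out : Int) : Decidable (Spec_jump_string i json out) := by
  unfold Spec_jump_string; infer_instance

-- ===== CLAIM (what is proved, stated in full; the proofs are below) =====
def Claim_equal_jump_string : Prop := ∀ (i : Int) (json : String), Dom_jump_string i json → Pre_jump_string i json → Spec_jump_string i json (jump_string i json)

-- ===== LEMMAS AND PROOFS =====

theorem pvStep_gt (cs : List Char) (p : Nat) : p < pvStep cs p := by
  unfold pvStep; split_ifs <;> omega

theorem pvIter_ge (cs : List Char) (k p : Nat) : p + k ≤ (pvStep cs)^[k] p := by
  induction k generalizing p with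
  | zero => simp
  | succ k ih =>
    rw [Function.iterate_succ_apply]
    have h1 := pvStep_gt cs p
    have h2 := ih (pvStep cs p)
    omega

theorem pvStep_plain (cs : List Char) (p : Nat) (h : cs[p]? ≠ some '\\') :
    pvStep cs p = p + 1 := by
  unfold pvStep; rw [if_neg h]

theorem pv_single_prefix {c : Char} {cs : List Char} {k : Nat} :
    [c] <+: cs.drop k ↔ cs[k]? = some c := by
  rw [← List.head?_drop]
  cases cs.drop k with
  | nil => simp
  | cons a t =>
    constructor
    · rintro ⟨u, hu⟩
      simp at hu
      simp [hu.1]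
    · intro h
      simp at h
      exact ⟨t, by simp [h]⟩

-- consecutive iterates over a stretch without backslashes

theorem pvIter_consec (cs : List Char) (p r : Nat)
    (hnb : ∀ m, p ≤ m → m < r → cs[m]? ≠ some '\\') :
    ∀ (d p' : Nat), p ≤ p' → p' + d ≤ r → (pvStep cs)^[d] p' = p' + d := by
  intro d
  induction d with
  | zero => simp
  | succ d ih =>
    intro p' hpp' hpd
    rw [Function.iterate_succ_apply, pvStep_plain cs p' (hnb p' hpp' (by omega))]
    rw [ih (p' + 1) (by omega) (by omega)]
    omega

theorem pv_jumpA_eq (cs : List Char) :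
    ∀ (k p fuel : Nat), k < fuel →
      cs[(pvStep cs)^[k] p]? = some '"' →
      (∀ j < k, cs[(pvStep cs)^[j] p]? ≠ some '"') →
      pv_jumpA cs fuel (p : Int) = (((pvStep cs)^[k] p : Nat) : Int) + 1 := by
  intro k
  induction k with
  | zero =>
    intro p fuel hfuel hq hmin
    obtain ⟨f, rfl⟩ : ∃ f, fuel = f + 1 := ⟨fuel - 1, by omega⟩
    simp only [Function.iterate_zero, id] at hq ⊢
    rw [pv_jumpA, PySem.List.pyGet?_natCast, hq]
    simp
  | succ k ih =>
    intro p fuel hfuel hq hmin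
    obtain ⟨f, rfl⟩ : ∃ f, fuel = f + 1 := ⟨fuel - 1, by omega⟩
    have hq' : cs[(pvStep cs)^[k] (pvStep cs p)]? = some '"' := by
      rwa [← Function.iterate_succ_apply]
    have hmin' : ∀ j < k, cs[(pvStep cs)^[j] (pvStep cs p)]? ≠ some '"' := by
      intro j hj
      rw [← Function.iterate_succ_apply]
      exact hmin (j + 1) (by omega)
    have hQ : (pvStep cs)^[k+1] p = (pvStep cs)^[k] (pvStep cs p) := Function.iterate_succ_apply _ _ _
    have h0 : cs[p]? ≠ some '"' := by simpa using hmin 0 (by omega)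
    -- cs[p]? cannot be none: iterates would stay out of range
    match hc : cs[p]? with
    | none =>
      exfalso
      have hlen : cs.length ≤ p := by
        by_contra h
        rw [List.getElem?_eq_getElem (by omega)] at hc; simp at hc
      have := pvIter_ge cs (k+1) p
      rw [List.getElem?_eq_none (by omega)] at hq
      simp at hq
    | some c =>
      rw [pv_jumpA, PySem.List.pyGet?_natCast, hc]
      simp only []
      have hcq : c ≠ '"' := by rintro rfl; exact h0 hc
      rw [if_neg hcq]
      by_cases hcb : c = '\\'
      · subst hcb
        rw [if_pos rfl]
        have hcast1 : ((p : Int) + 1) = ((p + 1 : Nat) : Int) := by push_cast; ring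
        rw [hcast1, PySem.List.pyGet?_natCast]
        match hc2 : cs[p+1]? with
        | none =>
          exfalso
          have hlen : cs.length ≤ p + 1 := by
            by_contra h
            rw [List.getElem?_eq_getElem (by omega)] at hc2; simp at hc2
          have hstep : pvStep cs p = p + 1 := by
            unfold pvStep; rw [if_pos hc, hc2]; simp
          have h1 := pvIter_ge cs k (pvStep cs p)
          rw [hstep] at h1
          rw [hQ, hstep, List.getElem?_eq_none (by omega)] at hq
          simp at hq
        | some c2 =>
          simp only []
          by_cases hu : c2 = 'u'
          · subst hu
            rw [if_pos rfl]
            have hstep : pvStep cs p = p + 6 := by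
              unfold pvStep; rw [if_pos hc, hc2]; simp
            have hcast : (((p + 1 : Nat) : Int) + 5) = ((p + 6 : Nat) : Int) := by push_cast; ring
            rw [hcast, hQ, ← hstep]
            exact ih (pvStep cs p) f (by omega) (hstep ▸ hq') (hstep ▸ hmin')
          · rw [if_neg hu]
            by_cases hmem : c2 ∈ ['"', '\\', '/', 'b', 'n', 'f', 'n', 't']
            · rw [if_pos hmem]
              have hstep : pvStep cs p = p + 2 := by
                unfold pvStep; rw [if_pos hc, hc2]
                rw [if_neg (by simpa using hu)]
                rw [if_pos (by simpa using hmem)]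
              have hcast : (((p + 1 : Nat) : Int) + 1) = ((p + 2 : Nat) : Int) := by push_cast; ring
              rw [hcast, hQ, ← hstep]
              exact ih (pvStep cs p) f (by omega) (hstep ▸ hq') (hstep ▸ hmin')
            · rw [if_neg hmem]
              have hstep : pvStep cs p = p + 1 := by
                unfold pvStep; rw [if_pos hc, hc2]
                rw [if_neg (by simpa using hu)]
                rw [if_neg (by simpa using hmem)]
              rw [hQ, ← hstep]
              exact ih (pvStep cs p) f (by omega) (hstep ▸ hq') (hstep ▸ hmin')
      · rw [if_neg hcb]
        have hstep : pvStep cs p = p + 1 := by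
          unfold pvStep
          rw [if_neg (by rw [hc]; simpa using hcb)]
        have hcast : ((p : Int) + 1) = ((p + 1 : Nat) : Int) := by push_cast; ring
        rw [hcast, hQ, ← hstep]
        exact ih (pvStep cs p) f (by omega) (hstep ▸ hq') (hstep ▸ hmin')

theorem pv_jumpB_eq (cs : List Char) :
    ∀ (k p fuel : Nat), k < fuel →
      cs[(pvStep cs)^[k] p]? = some '"' →
      (∀ j < k, cs[(pvStep cs)^[j] p]? ≠ some '"') →
      pv_jumpB cs fuel (p : Int) = (((pvStep cs)^[k] p : Nat) : Int) + 1 := by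
  intro k
  induction k using Nat.strong_induction_on with
  | _ k ih =>
  intro p fuel hfuel hq hmin
  obtain ⟨f, rfl⟩ : ∃ f, fuel = f + 1 := ⟨fuel - 1, by omega⟩
  have hpQ : p + k ≤ (pvStep cs)^[k] p := pvIter_ge cs k p
  set Q := (pvStep cs)^[k] p with hQdef
  have hQlen : Q < cs.length := by
    by_contra h
    rw [List.getElem?_eq_none (by omega)] at hq
    simp at hq
  have hplen : p ≤ cs.length := by omega
  -- the quote find succeeds
  have hQinfix : ['"'] <:+: cs.drop p := by
    have h1 : ['"'] <+: (cs.drop p).drop (Q - p) := by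
      rw [List.drop_drop, (by omega : p + (Q - p) = Q)]
      exact pv_single_prefix.mpr hq
    exact h1.isInfix.trans (List.drop_suffix _ _).isInfix
  have hqne : PySem.Chars.findFrom cs ['"'] (p : Int) none ≠ -1 := by
    intro h
    rw [PySem.Chars.findFrom_natCast_eq_neg_one_iff cs ['"'] p hplen] at h
    exact h hQinfix
  obtain ⟨hqge, hqpre, hqmin⟩ := PySem.Chars.findFrom_natCast_spec cs ['"'] p hplen hqne
  set q := PySem.Chars.findFrom cs ['"'] (p : Int) none with hqdef
  have hqget : cs[q.toNat]? = some '"' := pv_single_prefix.mp hqpre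
  have hq0 : (0 : Int) ≤ q := le_trans (by positivity) hqge
  have hqminne : ∀ m : Nat, p ≤ m → m < q.toNat → cs[m]? ≠ some '"' := by
    intro m h1 h2 hc
    exact hqmin m h1 h2 (pv_single_prefix.mpr hc)
  -- q is at most the quote iterate
  have hqleQ : q.toNat ≤ Q := by
    by_contra h
    exact hqminne Q (by omega) (by omega) hq
  rw [pv_jumpB]
  simp only [← hqdef]
  set b := PySem.Chars.findFrom cs ['\\'] (p : Int) none with hbdef
  by_cases hcond : q ≠ -1 ∧ (b = -1 ∨ q < b)
  · rw [if_pos hcond]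
    -- no backslash strictly before q
    have hnb : ∀ m : Nat, p ≤ m → m < q.toNat → cs[m]? ≠ some '\\' := by
      intro m h1 h2 hc
      rcases hcond.2 with hb1 | hb2
      · rw [hbdef, PySem.Chars.findFrom_natCast_eq_neg_one_iff cs ['\\'] p hplen] at hb1
        apply hb1
        have hpre : ['\\'] <+: (cs.drop p).drop (m - p) := by
          rw [List.drop_drop, (by omega : p + (m - p) = m)]
          exact pv_single_prefix.mpr hc
        exact hpre.isInfix.trans (List.drop_suffix _ _).isInfix
      · have hbne : b ≠ -1 := by intro h; rw [h] at hb2; omega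
        obtain ⟨hbge, hbpre, hbmin⟩ := PySem.Chars.findFrom_natCast_spec cs ['\\'] p hplen (hbdef ▸ hbne)
        rw [← hbdef] at hbmin
        exact hbmin m h1 (by omega) (pv_single_prefix.mpr hc)
    -- iterates are consecutive up to q, so the first quote iterate is q itself
    have hconsec := pvIter_consec cs p q.toNat hnb
    have hkq : k = q.toNat - p := by
      by_contra hne
      rcases Nat.lt_or_ge k (q.toNat - p) with hlt | hge
      · have hck := hconsec k p le_rfl (by omega)
        rw [← hQdef] at hck
        exact hqminne Q (by omega) (by omega) hq
      · have hd := hconsec (q.toNat - p) p le_rfl (by omega)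
        have hlt2 : q.toNat - p < k := by omega
        exact hmin (q.toNat - p) hlt2 (by rw [hd, (by omega : p + (q.toNat - p) = q.toNat)]; exact hqget)
    have hQq : Q = q.toNat := by
      have hck := hconsec k p le_rfl (by omega)
      rw [← hQdef] at hck
      omega
    omega
  · rw [if_neg hcond]
    have hbne : b ≠ -1 := by
      intro h
      exact hcond ⟨hqne, Or.inl h⟩
    rw [if_neg hbne]
    obtain ⟨hbge, hbpre, hbmin⟩ := PySem.Chars.findFrom_natCast_spec cs ['\\'] p hplen (hbdef ▸ hbne)
    rw [← hbdef] at hbge hbpre hbmin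
    have hbget : cs[b.toNat]? = some '\\' := pv_single_prefix.mp hbpre
    have hb0 : (0 : Int) ≤ b := le_trans (by positivity) hbge
    have hbq : b < q := by
      have hle : b ≤ q := by
        by_contra h
        exact hcond ⟨hqne, Or.inr (by omega)⟩
      have hne : b ≠ q := by
        intro h
        rw [h] at hbget
        rw [hqget] at hbget
        simp at hbget
      omega
    -- iterates are consecutive up to b
    have hnb : ∀ m : Nat, p ≤ m → m < b.toNat → cs[m]? ≠ some '\\' :=
      fun m h1 h2 hc => hbmin m h1 h2 (pv_single_prefix.mpr hc)
    set d := b.toNat - p with hddef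
    have hdcons : (pvStep cs)^[d] p = b.toNat :=
      (pvIter_consec cs p b.toNat hnb d p le_rfl (by omega)).trans (by omega)
    have hdk : d < k := by
      by_contra h
      have hkd : k ≤ d := Nat.le_of_not_lt h
      have hconsQ := pvIter_consec cs p b.toNat hnb k p le_rfl (by omega)
      rw [← hQdef] at hconsQ
      rcases Nat.lt_or_ge (p + k) b.toNat with hlt | hge
      · exact hqminne Q (by omega) (by omega) hq
      · have hQb : Q = b.toNat := by omega
        rw [hQb, hbget] at hq
        simp at hq
    have hp' : (pvStep cs)^[d + 1] p = pvStep cs b.toNat := by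
      rw [Function.iterate_succ_apply', hdcons]
    have hiter : ∀ j : Nat, (pvStep cs)^[j + (d + 1)] p = (pvStep cs)^[j] (pvStep cs b.toNat) := by
      intro j
      rw [Function.iterate_add_apply, hp']
    set k' := k - (d + 1) with hk'def
    have hk'k : k' + (d + 1) = k := by omega
    have hq'' : cs[(pvStep cs)^[k'] (pvStep cs b.toNat)]? = some '"' := by
      rw [← hiter, hk'k]; exact hq
    have hmin'' : ∀ j < k', cs[(pvStep cs)^[j] (pvStep cs b.toNat)]? ≠ some '"' := by
      intro j hj
      rw [← hiter]
      exact hmin (j + (d + 1)) (by omega)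
    have hQrw : ∀ t : Nat, pvStep cs b.toNat = t → Q = (pvStep cs)^[k'] t := by
      intro t ht
      rw [← ht, hQdef, ← hiter, hk'k]
    have hcast1 : (b + 1) = ((b.toNat + 1 : Nat) : Int) := by omega
    rw [hcast1, PySem.List.pyGet?_natCast]
    match hc2 : cs[b.toNat + 1]? with
    | none =>
      exfalso
      have hlen2 : cs.length ≤ b.toNat + 1 := by
        by_contra h
        rw [List.getElem?_eq_getElem (by omega)] at hc2; simp at hc2
      have hstep : pvStep cs b.toNat = b.toNat + 1 := by
        unfold pvStep; rw [if_pos hbget, hc2]; simp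
      have h1 := pvIter_ge cs k' (pvStep cs b.toNat)
      rw [hstep] at h1
      have h2 := hQrw (b.toNat + 1) hstep
      omega
    | some c2 =>
      simp only []
      by_cases hu : c2 = 'u'
      · subst hu
        rw [if_pos rfl]
        have hstep : pvStep cs b.toNat = b.toNat + 6 := by
          unfold pvStep; rw [if_pos hbget, hc2]; simp
        have hcast : (b + 6) = ((b.toNat + 6 : Nat) : Int) := by omega
        rw [hcast, hQrw (b.toNat + 6) hstep]
        exact ih k' (by omega) (b.toNat + 6) f (by omega) (hstep ▸ hq'') (hstep ▸ hmin'')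
      · rw [if_neg hu]
        by_cases hmem : c2 ∈ ['"', '\\', '/', 'b', 'n', 'f', 'n', 't']
        · rw [if_pos hmem]
          have hstep : pvStep cs b.toNat = b.toNat + 2 := by
            unfold pvStep; rw [if_pos hbget, hc2]
            rw [if_neg (by simpa using hu)]
            rw [if_pos (by simpa using hmem)]
          have hcast : (b + 2) = ((b.toNat + 2 : Nat) : Int) := by omega
          rw [hcast, hQrw (b.toNat + 2) hstep]
          exact ih k' (by omega) (b.toNat + 2) f (by omega) (hstep ▸ hq'') (hstep ▸ hmin'')
        · rw [if_neg hmem]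
          have hstep : pvStep cs b.toNat = b.toNat + 1 := by
            unfold pvStep; rw [if_pos hbget, hc2]
            rw [if_neg (by simpa using hu)]
            rw [if_neg (by simpa using hmem)]
          rw [hQrw (b.toNat + 1) hstep]
          exact ih k' (by omega) (b.toNat + 1) f (by omega) (hstep ▸ hq'') (hstep ▸ hmin'')

-- ===== VERDICT (by name: the statement is the Claim_ definition above) =====
theorem jump_string_spec : Claim_equal_jump_string := by
  intro i json hdom hpre
  obtain ⟨h0, k, hk, hq⟩ := hpre
  unfold Spec_jump_string jump_string jump_string_alt
  set cs := json.toList with hcs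
  set n := i.toNat with hn
  have hi : i = (n : Int) := by omega
  have hex : ∃ m, cs[(pvStep cs)^[m] n]? = some '"' := ⟨k, hq⟩
  have hfind := Nat.find_spec hex
  have hmin : ∀ j < Nat.find hex, cs[(pvStep cs)^[j] n]? ≠ some '"' :=
    fun j hj => Nat.find_min hex hj
  have hle : Nat.find hex ≤ k := Nat.find_min' hex hq
  have hfuel : Nat.find hex < cs.length + 1 := by omega
  rw [hi, pv_jumpA_eq cs (Nat.find hex) n (cs.length + 1) hfuel hfind hmin,
      pv_jumpB_eq cs (Nat.find hex) n (cs.length + 1) hfuel hfind hmin]
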